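-- pv_equiv track=rewrite | github.com/rossetv/mediaman | src/mediaman/services/downloads/download_format/_render.py | build_episode_summary
-- ===== SOURCE A (Python) =====
-- def build_episode_summary(episodes: list[dict[str, object]]) -> str:
--     """Build a human-readable summary like '2 of 8 episodes ready ...'."""
--     total = len(episodes)
--     ready = sum(1 for e in episodes if e["state"] == "ready")
--     downloading = sum(1 for e in episodes if e["state"] == "downloading")
--     queued = sum(1 for e in episodes if e["state"] == "queued")
--     searching = sum(1 for e in episodes if e["state"] == "searching")
--
--     parts = []
--     if ready:
--         parts.append(f"{ready} of {total} episodes ready")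
--     if downloading:
--         parts.append(f"{downloading} downloading")
--     if queued:
--         parts.append(f"{queued} queued")
--     if searching:
--         parts.append(f"{searching} searching")
--     return " · ".join(parts)
-- ===== SOURCE B (Python) =====
-- def build_episode_summary(episodes: list[dict[str, object]]) -> str:
--     """Sort the states, run-length group the sorted list, then format table-driven."""
--     states = sorted(e["state"] for e in episodes)
--     total = len(states)
--     runs = _runs(states)
--
--     def get(v):
--         for s, n in runs:
--             if s == v:
--                 return n
--         return 0
--
--     ready = get("ready")
--     table = [(get("downloading"), " downloading"),
--              (get("queued"), " queued"),
--              (get("searching"), " searching")]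
--     parts = ([f"{ready} of {total} episodes ready"] if ready else []) \
--         + [f"{n}{label}" for n, label in table if n]
--     return " · ".join(parts)
--
--
-- def _runs(states):
--     """Run-length encode a list: [(value, length of its run), ...]."""
--     if not states:
--         return []
--     head = states[0]
--     i = 1
--     while i < len(states) and states[i] == head:
--         i += 1
--     return [(head, i)] + _runs(states[i:])
-- ===== Notes on version B (the rewrite author's own statement) =====
-- stated objective: alternative
-- what changed: Replaces A's four per-state scans with sort-then-group: the states are sorted once, run-length encoded by a recursive grouper, the four counts are read from the run list, and the summary is assembled table-driven from a (count, label) table instead of four sequential if-appends.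
import Mathlib
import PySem

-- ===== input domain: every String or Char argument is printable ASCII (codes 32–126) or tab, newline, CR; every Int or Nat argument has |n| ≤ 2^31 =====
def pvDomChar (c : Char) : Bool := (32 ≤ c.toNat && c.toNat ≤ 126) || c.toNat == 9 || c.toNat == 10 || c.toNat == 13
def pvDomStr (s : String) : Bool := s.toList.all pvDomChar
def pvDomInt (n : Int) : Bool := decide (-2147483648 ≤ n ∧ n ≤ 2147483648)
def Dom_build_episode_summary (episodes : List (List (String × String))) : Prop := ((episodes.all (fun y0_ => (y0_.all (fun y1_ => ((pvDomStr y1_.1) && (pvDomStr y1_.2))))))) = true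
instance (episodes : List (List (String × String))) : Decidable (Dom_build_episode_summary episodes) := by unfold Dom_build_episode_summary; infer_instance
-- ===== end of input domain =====

-- B replaces A's four per-state scans by sort + run-length grouping + a table-driven
-- formatting pass; equivalence is proved on episodes that all carry a "state" key.

-- ===== PORT A =====
-- e["state"] under Pre_ (key present): first-match lookup with an unused default
def build_episode_summary (episodes : List (List (String × String))) : String :=
  let total : Int := episodes.length
  let ready : Int := episodes.foldl (fun acc e => if (PySem.Dict.mk e).getD "state" "" == "ready" then acc + 1 else acc) 0
  let downloading : Int := episodes.foldl (fun acc e => if (PySem.Dict.mk e).getD "state" "" == "downloading" then acc + 1 else acc) 0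
  let queued : Int := episodes.foldl (fun acc e => if (PySem.Dict.mk e).getD "state" "" == "queued" then acc + 1 else acc) 0
  let searching : Int := episodes.foldl (fun acc e => if (PySem.Dict.mk e).getD "state" "" == "searching" then acc + 1 else acc) 0
  let parts : List String := []
  let parts := if ready ≠ 0 then parts ++ [PySem.Int.toStr ready ++ " of " ++ PySem.Int.toStr total ++ " episodes ready"] else parts
  let parts := if downloading ≠ 0 then parts ++ [PySem.Int.toStr downloading ++ " downloading"] else parts
  let parts := if queued ≠ 0 then parts ++ [PySem.Int.toStr queued ++ " queued"] else parts
  let parts := if searching ≠ 0 then parts ++ [PySem.Int.toStr searching ++ " searching"] else parts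
  PySem.Str.join " · " parts

-- ===== PORT B =====
-- _runs: the while loop counting leading elements equal to head is takeWhile's length;
-- states[i:] is then dropWhile (exact: i = 1 + number of leading tail elements equal to head)
def pvRuns : List String → List (String × Int)
  | [] => []
  | h :: t =>
    (h, ((t.takeWhile (fun s => s == h)).length : Int) + 1) :: pvRuns (t.dropWhile (fun s => s == h))
termination_by l => l.length
decreasing_by
  exact Nat.lt_succ_of_le (t.dropWhile_sublist (fun s => s == h)).length_le

-- the inner 'get': first match in runs, else 0
def pvRunGet : List (String × Int) → String → Int
  | [], _ => 0
  | (s, n) :: rest, v => if s == v then n else pvRunGet rest v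

def build_episode_summary_alt (episodes : List (List (String × String))) : String :=
  let states : List String := PySem.List.sorted (episodes.map (fun e => (PySem.Dict.mk e).getD "state" "")) (fun x => x) false
  let total : Int := states.length
  let runs := pvRuns states
  let ready : Int := pvRunGet runs "ready"
  let table : List (Int × String) :=
    [(pvRunGet runs "downloading", " downloading"),
     (pvRunGet runs "queued", " queued"),
     (pvRunGet runs "searching", " searching")]
  let parts : List String :=
    (if ready ≠ 0 then [PySem.Int.toStr ready ++ " of " ++ PySem.Int.toStr total ++ " episodes ready"] else [])
    ++ (table.filter (fun p => p.1 ≠ 0)).map (fun p => PySem.Int.toStr p.1 ++ p.2)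
  PySem.Str.join " · " parts

-- ===== PRECONDITION & SPEC =====
-- Pre_ excludes episodes missing a "state" key, on which the Python A raises KeyError (so does B).
def Pre_build_episode_summary (episodes : List (List (String × String))) : Prop :=
  (episodes.all (fun e => e.any (fun kv => kv.1 == "state"))) = true
instance (episodes : List (List (String × String))) : Decidable (Pre_build_episode_summary episodes) := by unfold Pre_build_episode_summary; infer_instance
def pvWitness_build_episode_summary : (List (List (String × String))) :=
  [[("state", "ready"), ("title", "a")], [("state", "queued")], [("state", "ready")]]

def Spec_build_episode_summary (episodes : List (List (String × String))) (out : String) : Prop := out = build_episode_summary_alt episodes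
instance (episodes : List (List (String × String))) (out : String) : Decidable (Spec_build_episode_summary episodes out) := by unfold Spec_build_episode_summary; infer_instance

-- ===== CLAIM (what is proved, stated in full; the proofs are below) =====
def Claim_equal_build_episode_summary : Prop := ∀ (episodes : List (List (String × String))), Dom_build_episode_summary episodes → Pre_build_episode_summary episodes → Spec_build_episode_summary episodes (build_episode_summary episodes)

-- ===== LEMMAS AND PROOFS =====

-- the state of an episode, as both ports read it
def pvState (e : List (String × String)) : String := (PySem.Dict.mk e).getD "state" ""

-- A's per-state scan counts occurrences of v among the states
lemma fold_count (v : String) (l : List (List (String × String))) :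
    l.foldl (fun acc e => if (PySem.Dict.mk e).getD "state" "" == v then acc + 1 else acc) (0 : Int)
      = ((l.map pvState).count v : Int) := by
  rw [PySem.List.foldl_if_add_one]
  simp [pvState, List.count_eq_countP, List.countP_map, Function.comp_def]

-- after the head's run is dropped from a sorted tail, the head never recurs
lemma head_lt_of_mem_dropWhile (h : String) (t : List String)
    (hle : ∀ x ∈ t, h ≤ x) (hp : t.Pairwise (· ≤ ·)) :
    ∀ x ∈ t.dropWhile (fun s => s == h), h < x := by
  induction t with
  | nil => simp
  | cons a t' ih =>
    rcases List.pairwise_cons.mp hp with ⟨ha, hp'⟩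
    by_cases hah : a = h
    · subst hah
      rw [List.dropWhile_cons_of_pos (by simp)]
      exact ih (fun x hx => hle x (List.mem_cons_of_mem _ hx)) hp'
    · rw [List.dropWhile_cons_of_neg (by simpa using hah)]
      intro x hx
      rcases List.mem_cons.mp hx with rfl | hx'
      · exact lt_of_le_of_ne (hle x List.mem_cons_self) (Ne.symm hah)
      · exact lt_of_lt_of_le
          (lt_of_le_of_ne (hle a List.mem_cons_self) (Ne.symm hah)) (ha x hx')

-- first-match lookup in the run-length encoding of a sorted list is the count
lemma runGet_count (l : List String) (hp : l.Pairwise (· ≤ ·)) (v : String) :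
    pvRunGet (pvRuns l) v = ((l.count v : Nat) : Int) := by
  induction l using pvRuns.induct with
  | case1 => simp [pvRuns, pvRunGet]
  | case2 h t ih =>
    rcases List.pairwise_cons.mp hp with ⟨hle, hpt⟩
    have hpr : (t.dropWhile (fun s => s == h)).Pairwise (· ≤ ·) :=
      List.Pairwise.sublist (t.dropWhile_sublist (fun s => s == h)) hpt
    have hsplit : t.takeWhile (fun s => s == h) ++ t.dropWhile (fun s => s == h) = t :=
      t.takeWhile_append_dropWhile
    have hk : ∀ x ∈ t.takeWhile (fun s => s == h), x = h := by
      intro x hx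
      simpa using List.mem_takeWhile_imp hx
    rw [pvRuns]
    by_cases hv : h = v
    · subst hv
      rw [pvRunGet, if_pos (by simp)]
      have hdrop0 : List.count h (t.dropWhile (fun s => s == h)) = 0 := by
        rw [List.count_eq_zero]
        intro hmem
        exact absurd rfl (ne_of_gt (head_lt_of_mem_dropWhile h t hle hpt _ hmem))
      have hcountk : List.count h (t.takeWhile (fun s => s == h))
          = (t.takeWhile (fun s => s == h)).length := by
        rw [List.count_eq_length]
        intro b hb; simpa using (hk b hb).symm
      have hct : List.count h t = (t.takeWhile (fun s => s == h)).length := by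
        conv_lhs => rw [← hsplit]
        rw [List.count_append, hdrop0, hcountk, Nat.add_zero]
      rw [List.count_cons_self, hct]
      push_cast; ring
    · rw [pvRunGet, if_neg (by simpa using hv)]
      have hcountk : List.count v (t.takeWhile (fun s => s == h)) = 0 := by
        rw [List.count_eq_zero]
        intro hmem
        exact hv ((hk v hmem).symm)
      have hct : List.count v t = List.count v (t.dropWhile (fun s => s == h)) := by
        conv_lhs => rw [← hsplit]
        rw [List.count_append, hcountk, Nat.zero_add]
      have hv' : v ≠ h := fun h' => hv h'.symm
      rw [ih hpr]
      simp [List.count_cons, hct]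
      exact hv

-- B's run-list lookup of v over the sorted states equals A's scan for v
lemma runGet_sorted_eq_fold (v : String) (l : List (List (String × String))) :
    pvRunGet (pvRuns (PySem.List.sorted (l.map (fun e => (PySem.Dict.mk e).getD "state" "")) (fun x => x) false)) v
      = l.foldl (fun acc e => if (PySem.Dict.mk e).getD "state" "" == v then acc + 1 else acc) (0 : Int) := by
  have hpair : (PySem.List.sorted (l.map (fun e => (PySem.Dict.mk e).getD "state" "")) (fun x => x) false).Pairwise (· ≤ ·) := by
    simpa using PySem.List.sorted_pairwise (l.map (fun e => (PySem.Dict.mk e).getD "state" "")) (fun x => x)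
  rw [fold_count, runGet_count _ hpair v,
    (PySem.List.sorted_perm (l.map (fun e => (PySem.Dict.mk e).getD "state" "")) (fun x => x) false).count_eq]
  rfl

-- ===== VERDICT (by name: the statement is the Claim_ definition above) =====
theorem build_episode_summary_spec : Claim_equal_build_episode_summary := by
  intro episodes _ _
  show build_episode_summary episodes = build_episode_summary_alt episodes
  simp only [build_episode_summary, build_episode_summary_alt, runGet_sorted_eq_fold,
    PySem.List.length_sorted, List.length_map]
  set r := episodes.foldl (fun acc e => if (PySem.Dict.mk e).getD "state" "" == "ready" then acc + 1 else acc) (0 : Int)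
  set d := episodes.foldl (fun acc e => if (PySem.Dict.mk e).getD "state" "" == "downloading" then acc + 1 else acc) (0 : Int)
  set q := episodes.foldl (fun acc e => if (PySem.Dict.mk e).getD "state" "" == "queued" then acc + 1 else acc) (0 : Int)
  set s := episodes.foldl (fun acc e => if (PySem.Dict.mk e).getD "state" "" == "searching" then acc + 1 else acc) (0 : Int)
  by_cases hr : r = 0 <;> by_cases hd : d = 0 <;> by_cases hq : q = 0 <;> by_cases hs : s = 0 <;>
    simp [hr, hd, hq, hs, List.filter]
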